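-- pv_equiv track=rewrite | github.com/xyfJASON/ctrlora | scripts/pylib/itertools.py | check_iter_head
-- ===== SOURCE A (Python) =====
-- def check_iter_head(iterable):
--     it = iter(iterable)
--     try:
--         yield True, next(it)
--     except StopIteration:
--         return
--     for e in it:
--         yield False, e
-- ===== SOURCE B (Python) =====
-- def check_iter_head(iterable):
--     for i, e in enumerate(iterable):
--         yield i == 0, e
-- ===== Notes on version B (the rewrite author's own statement) =====
-- stated objective: simpler
-- what changed: Replaces the manual head extraction (iter/next with try-except StopIteration and a separate first yield) by one uniform enumerate pass deriving the flag from index == 0.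
import Mathlib
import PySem

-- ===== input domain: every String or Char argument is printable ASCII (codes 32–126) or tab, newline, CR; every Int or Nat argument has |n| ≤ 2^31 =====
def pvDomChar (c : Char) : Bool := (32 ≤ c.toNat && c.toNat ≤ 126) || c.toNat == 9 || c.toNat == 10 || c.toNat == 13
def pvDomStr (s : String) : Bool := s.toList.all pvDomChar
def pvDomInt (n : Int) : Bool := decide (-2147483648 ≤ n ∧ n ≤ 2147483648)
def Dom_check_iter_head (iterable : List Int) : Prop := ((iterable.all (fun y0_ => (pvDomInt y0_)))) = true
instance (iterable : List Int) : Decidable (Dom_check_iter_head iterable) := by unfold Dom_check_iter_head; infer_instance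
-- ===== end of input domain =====

-- B replaces A's try/except head extraction by one enumerate pass with flag = (index == 0); simpler decomposition, same output.

-- ===== PORT A =====
-- A: take the head via next(it) (StopIteration → empty result), yield (True, head), then loop over the rest yielding (False, e).
def check_iter_head (iterable : List Int) : List (Bool × Int) :=
  match iterable with
  | [] => []
  | h :: t => (true, h) :: t.foldr (fun e acc => (false, e) :: acc) []

-- ===== PORT B =====
-- B: single enumerate pass, flag derived from index == 0.
def check_iter_head_alt (iterable : List Int) : List (Bool × Int) :=
  (PySem.List.enumerate iterable).map (fun ie => (decide (ie.1 = 0), ie.2))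

-- ===== PRECONDITION & SPEC =====
def Spec_check_iter_head (iterable : List Int) (out : List (Bool × Int)) : Prop := out = check_iter_head_alt iterable
instance (iterable : List Int) (out : List (Bool × Int)) : Decidable (Spec_check_iter_head iterable out) := by unfold Spec_check_iter_head; infer_instance

-- ===== CLAIM (what is proved, stated in full; the proofs are below) =====
def Claim_equal_check_iter_head : Prop := ∀ (iterable : List Int), Dom_check_iter_head iterable → Spec_check_iter_head iterable (check_iter_head iterable)

-- ===== LEMMAS AND PROOFS =====

-- tail elements of B's map all carry flag false: enumerate from a positive start never hits index 0
theorem pv_enum_tail (t : List Int) (s : Int) (hs : 1 ≤ s) :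
    (PySem.List.enumerate t s).map (fun ie => (decide (ie.1 = 0), ie.2))
    = t.foldr (fun e acc => (false, e) :: acc) [] := by
  induction t generalizing s with
  | nil => simp [PySem.List.enumerate_nil]
  | cons h t ih =>
    simp only [PySem.List.enumerate_cons, List.map_cons, List.foldr_cons, ih (s+1) (by omega)]
    have : ¬ (s = 0) := by omega
    simp [this]

-- ===== VERDICT (by name: the statement is the Claim_ definition above) =====
theorem check_iter_head_spec : Claim_equal_check_iter_head := by
  intro iterable _
  unfold Spec_check_iter_head check_iter_head check_iter_head_alt
  cases iterable with
  | nil => simp [PySem.List.enumerate_nil]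
  | cons h t =>
    rw [PySem.List.enumerate_cons, List.map_cons, show (0 : Int) + 1 = 1 from rfl,
      pv_enum_tail t 1 (by norm_num)]
    norm_num
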